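-- pv_equiv track=rewrite | github.com/venkatchoudharyala/HeadLineGen | Compression.py | IterativeTrimming
-- ===== SOURCE A (Python) =====
-- def IterativeTrimming(HeadLine, SGRankList, Threshold):
--   if len(HeadLine) > Threshold:
--     if len(SGRankList) > 0:
--       ptr = SGRankList[-1]
--     else:
--       return HeadLine
--     if HeadLine.find(ptr) > 0:
--       if HeadLine[HeadLine.find(ptr) - 1] != ' ':
--         HeadLine = HeadLine.replace(ptr, ":", 1)
--       else:
--         HeadLine = HeadLine.replace(' ' + ptr, "", 1)
--     else:
--       HeadLine = HeadLine.replace(ptr + ' ', "", 1)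
--     return IterativeTrimming(HeadLine, SGRankList[: len(SGRankList) - 1], Threshold)
--   else:
--     return HeadLine
-- ===== SOURCE B (Python) =====
-- def _trim_once(HeadLine, ptr):
--     pos = HeadLine.find(ptr)
--     if pos > 0:
--         if HeadLine[pos - 1] != ' ':
--             return HeadLine.replace(ptr, ":", 1)
--         return HeadLine.replace(' ' + ptr, "", 1)
--     return HeadLine.replace(ptr + ' ', "", 1)
--
-- def IterativeTrimming(HeadLine, SGRankList, Threshold):
--     for ptr in reversed(SGRankList):
--         if len(HeadLine) > Threshold:
--             HeadLine = _trim_once(HeadLine, ptr)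
--     return HeadLine
-- ===== Notes on version B (the rewrite author's own statement) =====
-- stated objective: idiomatic
-- what changed: Replaced A's tail recursion peeling SGRankList[:-1] by slicing with a single iterative for-loop over reversed(SGRankList) guarded by the length threshold, with the one-step trim factored into a helper.
import Mathlib
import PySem

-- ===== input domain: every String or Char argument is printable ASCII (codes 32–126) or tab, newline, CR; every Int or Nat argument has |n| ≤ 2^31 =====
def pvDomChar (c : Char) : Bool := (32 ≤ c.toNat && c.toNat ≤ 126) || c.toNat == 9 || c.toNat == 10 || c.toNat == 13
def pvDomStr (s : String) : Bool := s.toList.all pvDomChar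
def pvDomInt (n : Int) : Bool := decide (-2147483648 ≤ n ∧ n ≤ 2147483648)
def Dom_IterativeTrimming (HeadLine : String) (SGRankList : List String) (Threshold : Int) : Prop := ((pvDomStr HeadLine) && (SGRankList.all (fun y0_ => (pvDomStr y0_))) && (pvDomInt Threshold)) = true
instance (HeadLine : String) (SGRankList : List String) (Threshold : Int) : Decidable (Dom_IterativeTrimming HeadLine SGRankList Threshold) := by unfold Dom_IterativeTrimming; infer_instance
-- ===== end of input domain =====

-- B replaces A's recursion (which re-slices SGRankList[:-1] at every step) by one
-- iterative pass over reversed(SGRankList) with the single-step trim as a helper.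

-- s.replace(old, new, 1): replace the first occurrence only (hand port, exact:
-- find gives the first occurrence or -1; old = "" is found at 0, matching CPython).
def replaceFirst (s old new : String) : String :=
  let i := PySem.Str.find s old
  if i < 0 then s
  else String.ofList (s.toList.take i.toNat ++ new.toList ++ s.toList.drop (i.toNat + old.toList.length))

-- ===== PORT A =====
def IterativeTrimming (HeadLine : String) (SGRankList : List String) (Threshold : Int) : String :=
  if PySem.Str.len HeadLine > Threshold then
    if 0 < PySem.List.len SGRankList then
      let ptr := (PySem.List.pyGet? SGRankList (-1)).getD ""   -- in range: list nonempty
      let HL :=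
        if PySem.Str.find HeadLine ptr > 0 then
          if PySem.Str.pyGet? HeadLine (PySem.Str.find HeadLine ptr - 1) ≠ some ' ' then
            replaceFirst HeadLine ptr ":"
          else
            replaceFirst HeadLine (" " ++ ptr) ""
        else
          replaceFirst HeadLine (ptr ++ " ") ""
      IterativeTrimming HL (PySem.List.slice SGRankList none (some (PySem.List.len SGRankList - 1))) Threshold
    else HeadLine
  else HeadLine
termination_by SGRankList.length
decreasing_by
  rename_i h
  rw [PySem.List.slice_to _ (by simp at h ⊢; omega)]
  simp at h ⊢
  omega

-- ===== PORT B =====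
def trimStep (hl ptr : String) : String :=
  let pos := PySem.Str.find hl ptr
  if pos > 0 then
    if PySem.Str.pyGet? hl (pos - 1) ≠ some ' ' then
      replaceFirst hl ptr ":"
    else
      replaceFirst hl (" " ++ ptr) ""
  else
    replaceFirst hl (ptr ++ " ") ""

def IterativeTrimming_alt (HeadLine : String) (SGRankList : List String) (Threshold : Int) : String :=
  SGRankList.reverse.foldl
    (fun hl ptr => if PySem.Str.len hl > Threshold then trimStep hl ptr else hl) HeadLine

-- ===== PRECONDITION & SPEC =====
def Spec_IterativeTrimming (HeadLine : String) (SGRankList : List String) (Threshold : Int) (out : String) : Prop := out = IterativeTrimming_alt HeadLine SGRankList Threshold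
instance (HeadLine : String) (SGRankList : List String) (Threshold : Int) (out : String) : Decidable (Spec_IterativeTrimming HeadLine SGRankList Threshold out) := by unfold Spec_IterativeTrimming; infer_instance

-- ===== CLAIM (what is proved, stated in full; the proofs are below) =====
def Claim_equal_IterativeTrimming : Prop := ∀ (HeadLine : String) (SGRankList : List String) (Threshold : Int), Dom_IterativeTrimming HeadLine SGRankList Threshold → Spec_IterativeTrimming HeadLine SGRankList Threshold (IterativeTrimming HeadLine SGRankList Threshold)

-- ===== LEMMAS AND PROOFS =====
theorem foldl_trim_const (Threshold : Int) (l : List String) (hl : String)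
    (h : ¬ PySem.Str.len hl > Threshold) :
    l.foldl (fun hl ptr => if PySem.Str.len hl > Threshold then trimStep hl ptr else hl) hl = hl := by
  induction l with
  | nil => rfl
  | cons x xs ih => rw [List.foldl_cons, if_neg h]; exact ih

theorem IterativeTrimming_eq_alt (Threshold : Int) (l : List String) :
    ∀ hl : String, IterativeTrimming hl l Threshold = IterativeTrimming_alt hl l Threshold := by
  induction l using List.reverseRecOn with
  | nil =>
    intro hl
    rw [IterativeTrimming]
    simp [IterativeTrimming_alt]
  | append_singleton init x ih =>
    intro hl
    rw [IterativeTrimming]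
    have hlen : (0:Int) < PySem.List.len (init ++ [x]) := by simp
    have hget : PySem.List.pyGet? (init ++ [x]) (-1) = some x :=
      PySem.List.pyGet?_neg_one_append_singleton init x
    have hslice : PySem.List.slice (init ++ [x]) none (some (PySem.List.len (init ++ [x]) - 1)) = init := by
      rw [PySem.List.slice_to _ (by simp)]
      simp
    by_cases h : PySem.Str.len hl > Threshold
    · rw [if_pos h, if_pos hlen]
      simp only [hget, Option.getD_some, hslice]
      rw [ih]
      simp only [IterativeTrimming_alt, List.reverse_append, List.reverse_cons,
        List.reverse_nil, List.nil_append, List.singleton_append, List.foldl_cons, if_pos h]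
      rfl
    · rw [if_neg h]
      simp only [IterativeTrimming_alt, List.reverse_append, List.reverse_cons,
        List.reverse_nil, List.nil_append, List.singleton_append, List.foldl_cons, if_neg h]
      exact (foldl_trim_const Threshold init.reverse hl h).symm

-- ===== VERDICT (by name: the statement is the Claim_ definition above) =====
theorem IterativeTrimming_spec : Claim_equal_IterativeTrimming := by
  intro HeadLine SGRankList Threshold _
  exact IterativeTrimming_eq_alt Threshold SGRankList HeadLine
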